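-- pv_equiv track=rewrite | github.com/CoRAL-ASU/Agentic_ADAF | agents/context_agent.py | fetch_relevant_text
-- ===== SOURCE A (Python) =====
-- from typing import Iterable, Optional
--
-- def fetch_relevant_text(question: str, paragraphs: Optional[Iterable[str]] = None) -> str:
--     """Return the most relevant paragraph for ``question``.
--
--     Relevance is determined by simple token overlap between the question and
--     each paragraph.  If no paragraphs are provided, an empty string is
--     returned.
--     """
--
--     if not paragraphs:
--         return ""
--
--     q_tokens = set(question.lower().split())
--     best_para = ""
--     best_score = 0
--     for para in paragraphs:
--         tokens = set(para.lower().split())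
--         score = len(q_tokens & tokens)
--         if score > best_score:
--             best_score = score
--             best_para = para
--     return best_para
-- ===== SOURCE B (Python) =====
-- from collections import defaultdict
-- from typing import Iterable, Optional
--
--
-- def fetch_relevant_text(question: str, paragraphs: Optional[Iterable[str]] = None) -> str:
--     """Inverted-index re-implementation: one token->paragraph-indices index,
--     then per-paragraph overlap counts driven by the question's tokens."""
--     if not paragraphs:
--         return ""
--     paras = list(paragraphs)
--     index = defaultdict(list)
--     for i, para in enumerate(paras):
--         for tok in set(para.lower().split()):
--             index[tok].append(i)
--     counts = [0] * len(paras)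
--     for tok in set(question.lower().split()):
--         for i in index.get(tok, []):
--             counts[i] += 1
--     best_i = -1
--     best = 0
--     for i, c in enumerate(counts):
--         if c > best:
--             best_i, best = i, c
--     return paras[best_i] if best > 0 else ""
-- ===== Notes on version B (the rewrite author's own statement) =====
-- stated objective: alternative
-- what changed: Replaces the per-paragraph set-intersection scan with an inverted token->paragraph-index map built once, per-paragraph overlap counts accumulated by looking up each question token in that index, and a final argmax scan over the counts (earliest index wins ties, empty string when the best count is 0).
import Mathlib
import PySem

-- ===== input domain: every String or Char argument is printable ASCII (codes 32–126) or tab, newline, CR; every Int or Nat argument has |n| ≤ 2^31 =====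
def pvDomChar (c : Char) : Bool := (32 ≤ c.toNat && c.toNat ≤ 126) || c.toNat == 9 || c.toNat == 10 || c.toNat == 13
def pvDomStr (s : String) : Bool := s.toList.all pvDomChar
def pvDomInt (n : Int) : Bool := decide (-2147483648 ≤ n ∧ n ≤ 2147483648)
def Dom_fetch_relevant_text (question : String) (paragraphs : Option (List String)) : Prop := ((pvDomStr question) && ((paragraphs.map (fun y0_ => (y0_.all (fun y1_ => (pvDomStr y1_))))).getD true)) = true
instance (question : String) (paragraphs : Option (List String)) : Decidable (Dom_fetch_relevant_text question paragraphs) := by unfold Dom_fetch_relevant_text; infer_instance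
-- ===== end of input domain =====

-- B replaces A's per-paragraph set-intersection scan by an inverted token->paragraph-indices
-- index plus an argmax over per-paragraph counts; objective: alternative algorithm, same result.

-- shared tokenisation helper: set(s.lower().split())
def pvTokens (s : String) : PySem.Set String :=
  PySem.Set.ofList (PySem.Str.split₀ (PySem.Str.lower s))

-- ===== PORT A =====
def fetch_relevant_text (question : String) (paragraphs : Option (List String)) : String :=
  match paragraphs with
  | none => ""
  | some paras =>
    if paras.isEmpty then "" else
      let q_tokens := pvTokens question
      let r := paras.foldl (fun (st : String × Int) para =>
          let tokens := pvTokens para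
          let score := PySem.Set.len (PySem.Set.inter q_tokens tokens)
          if score > st.2 then (para, score) else st) ("", 0)
      r.1

-- ===== PORT B =====
-- index[tok].append(i) for each tok in the i-th paragraph's token set
def pvIndexAdd (d : PySem.Dict String (List Int)) (p : Int × String) : PySem.Dict String (List Int) :=
  (pvTokens p.2).foldl (fun d tok => d.modify tok [] (fun l => l ++ [p.1])) d

def fetch_relevant_text_alt (question : String) (paragraphs : Option (List String)) : String :=
  match paragraphs with
  | none => ""
  | some paras =>
    if paras.isEmpty then "" else
      let index := (PySem.List.enumerate paras).foldl pvIndexAdd PySem.Dict.empty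
      let counts := (pvTokens question).foldl
          (fun cs tok => (index.getD tok []).foldl
            (fun cs i => PySem.List.pySetD cs i (PySem.List.pyGetD cs i 0 + 1)) cs)
          (List.replicate paras.length (0 : Int))
      let r := (PySem.List.enumerate counts).foldl
          (fun (st : Int × Int) p => if p.2 > st.2 then (p.1, p.2) else st) ((-1 : Int), (0 : Int))
      if r.2 > 0 then PySem.List.pyGetD paras r.1 "" else ""

-- ===== PRECONDITION & SPEC =====
def Spec_fetch_relevant_text (question : String) (paragraphs : Option (List String)) (out : String) : Prop := out = fetch_relevant_text_alt question paragraphs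
instance (question : String) (paragraphs : Option (List String)) (out : String) : Decidable (Spec_fetch_relevant_text question paragraphs out) := by unfold Spec_fetch_relevant_text; infer_instance

-- ===== CLAIM (what is proved, stated in full; the proofs are below) =====
def Claim_equal_fetch_relevant_text : Prop := ∀ (question : String) (paragraphs : Option (List String)), Dom_fetch_relevant_text question paragraphs → Spec_fetch_relevant_text question paragraphs (fetch_relevant_text question paragraphs)

-- ===== LEMMAS AND PROOFS =====

-- A's score of a paragraph
def pvScore (q : PySem.Set String) (para : String) : Int :=
  PySem.Set.len (PySem.Set.inter q (pvTokens para))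

-- postings list of a token after the index build
def pvPost (paras : List String) (t : String) : List Int :=
  ((PySem.List.enumerate paras).filter (fun p => decide (t ∈ pvTokens p.2))).map (·.1)

-- inner index loop: appending i under every token of a duplicate-free token list
theorem pv_inner_index (S : List String) (hS : S.Nodup) (i : Int) :
    ∀ (d : PySem.Dict String (List Int)) (t : String),
    (S.foldl (fun d tok => d.modify tok [] (fun l => l ++ [i])) d).getD t []
      = d.getD t [] ++ (if t ∈ S then [i] else []) := by
  induction S with
  | nil => intro d t; simp
  | cons a S ih =>
    intro d t
    rcases List.nodup_cons.mp hS with ⟨ha, hS'⟩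
    rw [List.foldl_cons, ih hS']
    rw [PySem.Dict.getD_modify]
    by_cases h : t = a
    · subst h; simp [ha]
    · simp [h, List.mem_cons]

-- index build: the postings list of each token
theorem pv_index_build (l : List (Int × String)) :
    ∀ (d : PySem.Dict String (List Int)) (t : String),
    (l.foldl pvIndexAdd d).getD t []
      = d.getD t [] ++ (l.filter (fun p => decide (t ∈ pvTokens p.2))).map (·.1) := by
  induction l with
  | nil => intro d t; simp
  | cons p l ih =>
    intro d t
    rw [List.foldl_cons, ih, List.filter_cons]
    have hstep : (pvIndexAdd d p).getD t []
        = d.getD t [] ++ (if t ∈ pvTokens p.2 then [p.1] else []) :=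
      pv_inner_index _ (PySem.Set.nodup_ofList _) _ d t
    by_cases hm : t ∈ pvTokens p.2
    · simp [hstep, hm]
    · simp [hstep, hm]

theorem pv_post_spec (paras : List String) (t : String) :
    ((PySem.List.enumerate paras).foldl pvIndexAdd PySem.Dict.empty).getD t [] = pvPost paras t := by
  rw [pv_index_build]
  simp [pvPost, PySem.Dict.empty, PySem.Dict.getD, PySem.Dict.get?]

-- membership in a postings list
theorem pv_mem_post (paras : List String) (t : String) (j : Int) :
    j ∈ pvPost paras t ↔ ∃ (k : Nat), k < paras.length ∧ j = (k : Int) ∧ ∃ (h : k < paras.length), t ∈ pvTokens paras[k] := by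
  unfold pvPost
  simp only [List.mem_map, List.mem_filter, PySem.List.mem_enumerate_iff]
  constructor
  · rintro ⟨p, ⟨⟨k, hk, rfl⟩, hp⟩, rfl⟩
    exact ⟨k, hk, by simp, hk, by simpa using hp⟩
  · rintro ⟨k, hk, rfl, _, ht⟩
    exact ⟨((0 : Int) + (k : Int), paras[k]), ⟨⟨k, hk, rfl⟩, by simpa using ht⟩, by simp⟩

-- postings lists are strictly increasing, hence duplicate-free
theorem pv_post_nodup (paras : List String) (t : String) : (pvPost paras t).Nodup := by
  have hP : ((PySem.List.enumerate paras).filter (fun p => decide (t ∈ pvTokens p.2))).Pairwise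
      (fun p q : Int × String => p.1 < q.1) :=
    List.Pairwise.filter _ (PySem.List.pairwise_lt_enumerate paras 0)
  have : (pvPost paras t).Pairwise (· < ·) := by
    unfold pvPost; rw [List.pairwise_map]; exact hP
  exact this.imp (fun h => ne_of_lt h)

-- counting loop over one postings list: adds 1 at each listed index, keeps the length
theorem pv_counts_inner (L : List Int) :
    ∀ (cs : List Int), (∀ j ∈ L, ∃ k : Nat, j = (k : Int) ∧ k < cs.length) →
    (L.foldl (fun cs i => PySem.List.pySetD cs i (PySem.List.pyGetD cs i 0 + 1)) cs).length = cs.length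
     ∧ ∀ (k : Nat), k < cs.length →
        PySem.List.pyGetD (L.foldl (fun cs i => PySem.List.pySetD cs i (PySem.List.pyGetD cs i 0 + 1)) cs) (k : Int) 0
          = PySem.List.pyGetD cs (k : Int) 0 + L.count (k : Int) := by
  induction L with
  | nil => intro cs _; exact ⟨rfl, by intro k _; simp⟩
  | cons j L ih =>
    intro cs hmem
    rcases hmem j (List.mem_cons_self) with ⟨m, rfl, hmlt⟩
    set cs' := PySem.List.pySetD cs (m : Int) (PySem.List.pyGetD cs (m : Int) 0 + 1) with hcs'
    have hlen' : cs'.length = cs.length := PySem.List.length_pySetD cs _ _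
    have hmem' : ∀ j ∈ L, ∃ k : Nat, j = (k : Int) ∧ k < cs'.length := by
      intro j hj
      rcases hmem j (List.mem_cons_of_mem _ hj) with ⟨k, rfl, hk⟩
      exact ⟨k, rfl, by omega⟩
    rcases ih cs' hmem' with ⟨ihlen, ihget⟩
    constructor
    · rw [List.foldl_cons]; rw [ihlen, hlen']
    · intro k hk
      rw [List.foldl_cons, ihget k (by omega)]
      have hset := PySem.List.pyGetD_pySetD_natCast cs m k (PySem.List.pyGetD cs (m : Int) 0 + 1) 0 hmlt
      rw [hcs'] at *
      rw [hset, List.count_cons]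
      by_cases hkm : k = m
      · subst hkm; simp; ring
      · have : ¬ ((m : Int) == (k : Int)) = true := by
          simp; omega
        simp [hkm, this]

-- the whole counting phase: each slot accumulates the per-token postings counts
theorem pv_counts_all (Ls : String → List Int) (q : List String) :
    ∀ (cs : List Int), (∀ tok, ∀ j ∈ Ls tok, ∃ k : Nat, j = (k : Int) ∧ k < cs.length) →
    (q.foldl (fun cs tok => (Ls tok).foldl
        (fun cs i => PySem.List.pySetD cs i (PySem.List.pyGetD cs i 0 + 1)) cs) cs).length = cs.length
     ∧ ∀ (k : Nat), k < cs.length →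
        PySem.List.pyGetD (q.foldl (fun cs tok => (Ls tok).foldl
          (fun cs i => PySem.List.pySetD cs i (PySem.List.pyGetD cs i 0 + 1)) cs) cs) (k : Int) 0
          = PySem.List.pyGetD cs (k : Int) 0 + (q.map (fun tok => ((Ls tok).count (k : Int) : Int))).sum := by
  induction q with
  | nil => intro cs _; exact ⟨rfl, by intro k _; simp⟩
  | cons tok q ih =>
    intro cs hmem
    rcases pv_counts_inner (Ls tok) cs (hmem tok) with ⟨hlen1, hget1⟩
    set cs' := (Ls tok).foldl (fun cs i => PySem.List.pySetD cs i (PySem.List.pyGetD cs i 0 + 1)) cs with hcs'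
    have hmem' : ∀ t, ∀ j ∈ Ls t, ∃ k : Nat, j = (k : Int) ∧ k < cs'.length := by
      intro t j hj
      rcases hmem t j hj with ⟨k, rfl, hk⟩
      exact ⟨k, rfl, by omega⟩
    rcases ih cs' hmem' with ⟨ihlen, ihget⟩
    constructor
    · rw [List.foldl_cons, ihlen, hlen1]
    · intro k hk
      rw [List.foldl_cons, ihget k (by omega), hget1 k hk, List.map_cons, List.sum_cons]
      ring

-- relation maintained between A's (best_para, best_score) and B's (best_i, best)
def pvRel (P : List String) (ra : String × Int) (rb : Int × Int) : Prop :=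
  ra.2 = rb.2 ∧ 0 ≤ rb.2 ∧ (0 < rb.2 → PySem.List.pyGetD P rb.1 "" = ra.1) ∧ (rb.2 = 0 → ra.1 = "")

-- the two selection scans stay related
theorem pv_sel (f : String → Int) (P : List String) :
    ∀ (l : List String) (s : Nat), P.drop s = l → ∀ (bp : String) (b bi : Int),
    0 ≤ b → (0 < b → PySem.List.pyGetD P bi "" = bp) → (b = 0 → bp = "") →
    pvRel P
      (l.foldl (fun (st : String × Int) para => if f para > st.2 then (para, f para) else st) (bp, b))
      ((PySem.List.enumerate (l.map f) (s : Int)).foldl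
        (fun (st : Int × Int) p => if p.2 > st.2 then (p.1, p.2) else st) (bi, b)) := by
  intro l
  induction l with
  | nil =>
    intro s _ bp b bi h0 h1 h2
    exact ⟨rfl, h0, h1, h2⟩
  | cons x l ih =>
    intro s hdrop bp b bi h0 h1 h2
    have hs : s < P.length := by
      by_contra hle
      rw [List.drop_eq_nil_of_le (by omega)] at hdrop
      exact List.cons_ne_nil _ _ hdrop.symm
    have hx? : P[s]? = some x := by
      have := congrArg List.head? hdrop
      simpa [List.head?_drop] using this
    have hx : P[s] = x := by
      rw [List.getElem?_eq_getElem hs] at hx?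
      exact Option.some.inj hx?
    have hdrop' : P.drop (s + 1) = l := by
      rw [← List.tail_drop, hdrop]
      rfl

    rw [List.map_cons, PySem.List.enumerate_cons, List.foldl_cons, List.foldl_cons]
    have hcast : (s : Int) + 1 = ((s + 1 : Nat) : Int) := by push_cast; ring
    by_cases hc : f x > b
    · simp only [hc, if_pos]
      rw [hcast]
      exact ih (s + 1) hdrop' x (f x) (s : Int) (by omega)
        (fun _ => by simp [PySem.List.pyGetD_natCast, List.getD_eq_getElem?_getD, hs, hx])
        (fun h => by omega)
    · simp only [hc, if_false]
      rw [hcast]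
      exact ih (s + 1) hdrop' bp b bi h0 h1 h2

-- counts computed by B are exactly A's scores, slot by slot
set_option maxHeartbeats 1600000 in
theorem pv_counts_eq (question : String) (paras : List String) :
    ((pvTokens question).foldl
        (fun cs tok => ((((PySem.List.enumerate paras).foldl pvIndexAdd PySem.Dict.empty).getD tok []).foldl
          (fun cs i => PySem.List.pySetD cs i (PySem.List.pyGetD cs i 0 + 1)) cs))
        (List.replicate paras.length (0 : Int)))
      = paras.map (pvScore (pvTokens question)) := by
  have hpost : ∀ tok, (((PySem.List.enumerate paras).foldl pvIndexAdd PySem.Dict.empty).getD tok []) = pvPost paras tok :=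
    fun tok => pv_post_spec paras tok
  have hmem : ∀ tok, ∀ j ∈ pvPost paras tok, ∃ k : Nat, j = (k : Int) ∧ k < (List.replicate paras.length (0 : Int)).length := by
    intro tok j hj
    rcases (pv_mem_post paras tok j).mp hj with ⟨k, hk, rfl, _⟩
    exact ⟨k, rfl, by simpa using hk⟩
  have hrw : ((pvTokens question).foldl
        (fun cs tok => ((((PySem.List.enumerate paras).foldl pvIndexAdd PySem.Dict.empty).getD tok []).foldl
          (fun cs i => PySem.List.pySetD cs i (PySem.List.pyGetD cs i 0 + 1)) cs))
        (List.replicate paras.length (0 : Int)))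
      = ((pvTokens question).foldl
        (fun cs tok => ((pvPost paras tok).foldl
          (fun cs i => PySem.List.pySetD cs i (PySem.List.pyGetD cs i 0 + 1)) cs))
        (List.replicate paras.length (0 : Int))) := by
    apply PySem.List.foldl_congr_mem
    intro acc tok _
    rw [hpost]
  rw [hrw]
  rcases pv_counts_all (fun tok => pvPost paras tok) (pvTokens question) (List.replicate paras.length (0 : Int)) hmem with ⟨hlen, hget⟩
  apply List.ext_getElem
  · rw [hlen]; simp
  · intro k hk1 hk2
    have hkp : k < paras.length := by simpa using hk2
    have hkr : k < (List.replicate paras.length (0 : Int)).length := by simpa using hkp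
    have := hget k hkr
    have hgetelem : ∀ (xs : List Int) (h : k < xs.length), PySem.List.pyGetD xs (k : Int) 0 = xs[k] := by
      intro xs h
      rw [PySem.List.pyGetD_natCast, List.getD_eq_getElem?_getD]
      simp [h]
    rw [hgetelem _ hk1] at this
    rw [this, hgetelem (List.replicate paras.length (0 : Int)) hkr]
    have hcount : ∀ tok, ((pvPost paras tok).count ((k : Int)) : Int)
        = if tok ∈ pvTokens paras[k] then 1 else 0 := by
      intro tok
      by_cases hm : tok ∈ pvTokens paras[k]
      · rw [List.count_eq_one_of_mem (pv_post_nodup paras tok)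
          ((pv_mem_post paras tok (k : Int)).mpr ⟨k, hkp, rfl, hkp, hm⟩)]
        simp [hm]
      · rw [List.count_eq_zero_of_not_mem]
        · simp [hm]
        · intro hc
          rcases (pv_mem_post paras tok (k : Int)).mp hc with ⟨k', hk', hkk, _, hm'⟩
          have : k' = k := by omega
          subst this
          exact hm hm'
    rw [List.map_congr_left (fun tok _ => hcount tok)]
    have hsum : ((pvTokens question).map (fun tok => if tok ∈ pvTokens paras[k] then (1 : Int) else 0)).sum
        = ((pvTokens question).countP (fun tok => decide (tok ∈ pvTokens paras[k])) : Int) := by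
      induction (pvTokens question : List String) with
      | nil => simp
      | cons a q ihq =>
        rw [List.map_cons, List.sum_cons, ihq, List.countP_cons]
        by_cases hm : a ∈ pvTokens paras[k] <;> simp [hm] <;> ring
    rw [hsum]
    simp [List.getElem_map, pvScore, PySem.Set.len, PySem.Set.inter, List.countP_eq_length_filter]
  
-- ===== VERDICT (by name: the statement is the Claim_ definition above) =====
set_option maxHeartbeats 1600000 in
theorem fetch_relevant_text_spec : Claim_equal_fetch_relevant_text := by
  intro question paragraphs _
  unfold Spec_fetch_relevant_text
  cases paragraphs with
  | none => rfl
  | some paras =>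
    by_cases hE : paras.isEmpty
    · simp [fetch_relevant_text, fetch_relevant_text_alt, hE]
    · simp only [fetch_relevant_text, fetch_relevant_text_alt, hE, Bool.false_eq_true, if_false]
      rw [pv_counts_eq question paras]
      have hrel := pv_sel (pvScore (pvTokens question)) paras paras 0 rfl "" 0 (-1)
        le_rfl (fun h => absurd h (lt_irrefl 0)) (fun _ => rfl)
      simp only [Nat.cast_zero] at hrel
      obtain ⟨heq, hnn, hpos, hzero⟩ := hrel
      set rb := (PySem.List.enumerate (paras.map (pvScore (pvTokens question))) 0).foldl
          (fun (st : Int × Int) p => if p.2 > st.2 then (p.1, p.2) else st) ((-1 : Int), (0 : Int)) with hrb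
      set ra := paras.foldl (fun (st : String × Int) para =>
          if pvScore (pvTokens question) para > st.2 then (para, pvScore (pvTokens question) para) else st)
          ("", 0) with hra
      show ra.1 = (if rb.2 > 0 then PySem.List.pyGetD paras rb.1 "" else "")
      by_cases h : 0 < rb.2
      · rw [if_pos h]
        exact (hpos h).symm
      · rw [if_neg h]
        exact hzero (by omega)
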